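-- pv_equiv track=rewrite | github.com/johnmarcb/Eterspire-API | scraper.py | parse_wikitext_table
-- ===== SOURCE A (Python) =====
-- def parse_wikitext_table(table_text):
--     """Parse a wikitext table into rows of cells"""
--     rows = []
--     current_row = []
--
--     lines = table_text.split('\n')
--     for line in lines:
--         line = line.strip()
--
--         if line.startswith('|-'):
--             if current_row:
--                 rows.append(current_row)
--             current_row = []
--         elif line.startswith('|') and not line.startswith('|}') and not line.startswith('|-'):
--             if line.count('|') > 1:
--                 cell = line.split('|')[-1].strip()
--             else:
--                 cell = line[1:].strip()
--
--             if not line.startswith('!'):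
--                 current_row.append(cell)
--
--     if current_row:
--         rows.append(current_row)
--
--     return rows
-- ===== SOURCE B (Python) =====
-- def _cell(line):
--     """Extract the cell text carried by a '|'-line."""
--     if line.count('|') > 1:
--         return line.split('|')[-1].strip()
--     return line[1:].strip()
--
--
-- def _groups(lines):
--     """Partition lines into groups, cutting at every '|-' separator line."""
--     if not lines:
--         return [[]]
--     head, rest = lines[0], lines[1:]
--     if head.startswith('|-'):
--         return [[]] + _groups(rest)
--     gs = _groups(rest)
--     return [[head] + gs[0]] + gs[1:]
--
--
-- def parse_wikitext_table(table_text):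
--     """Parse a wikitext table into rows of cells"""
--     stripped = [ln.strip() for ln in table_text.split('\n')]
--     rows = []
--     for g in _groups(stripped):
--         cells = [_cell(ln) for ln in g
--                  if ln.startswith('|') and not ln.startswith('|}')]
--         if cells:
--             rows.append(cells)
--     return rows
-- ===== Notes on version B (the rewrite author's own statement) =====
-- stated objective: alternative
-- what changed: B replaces A's single stateful fold (rows list plus mutable current_row) by a two-stage decomposition: recursively partition the stripped lines into groups at the row-separator lines, then map each group to its list of cells and keep the non-empty ones.
import Mathlib
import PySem

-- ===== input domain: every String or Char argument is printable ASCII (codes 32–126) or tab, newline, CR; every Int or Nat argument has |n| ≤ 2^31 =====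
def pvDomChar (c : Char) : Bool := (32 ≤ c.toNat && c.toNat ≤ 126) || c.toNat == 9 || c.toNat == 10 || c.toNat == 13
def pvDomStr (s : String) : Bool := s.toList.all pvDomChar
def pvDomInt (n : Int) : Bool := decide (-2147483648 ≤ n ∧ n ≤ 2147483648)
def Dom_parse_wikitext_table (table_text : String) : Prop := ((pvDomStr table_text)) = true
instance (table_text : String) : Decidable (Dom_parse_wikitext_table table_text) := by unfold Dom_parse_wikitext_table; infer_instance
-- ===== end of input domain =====

-- B is an ALTERNATIVE decomposition of the same parse: partition-into-groups then map, instead of A's stateful fold; same cost.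

-- ===== PORT A =====
def parse_wikitext_table (table_text : String) : List (List String) :=
  let lines := (PySem.Str.split? table_text "\n").getD []
  let st := lines.foldl
    (fun (st : List (List String) × List String) (raw : String) =>
      let line := PySem.Str.strip raw
      if PySem.Str.startswith line "|-" then
        ((if st.2.isEmpty then st.1 else st.1 ++ [st.2]), [])
      else if PySem.Str.startswith line "|" && !PySem.Str.startswith line "|}"
              && !PySem.Str.startswith line "|-" then
        let cell :=
          if 1 < PySem.Str.count line "|" then
            -- split('|') is never empty, so Python's [-1] is exact here; getD is unreachable
            PySem.Str.strip ((PySem.List.pyGet? ((PySem.Str.split? line "|").getD []) (-1)).getD "")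
          else
            PySem.Str.strip (PySem.Str.slice line (some 1) none)
        if !PySem.Str.startswith line "!" then (st.1, st.2 ++ [cell]) else (st.1, st.2)
      else st)
    ([], [])
  if st.2.isEmpty then st.1 else st.1 ++ [st.2]

-- ===== PORT B =====
def pvCell (line : String) : String :=
  if 1 < PySem.Str.count line "|" then
    -- split('|') is never empty, so Python's [-1] is exact here; getD is unreachable
    PySem.Str.strip ((PySem.List.pyGet? ((PySem.Str.split? line "|").getD []) (-1)).getD "")
  else
    PySem.Str.strip (PySem.Str.slice line (some 1) none)

def pvGroups : List String → List (List String)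
  | [] => [[]]
  | head :: rest =>
    if PySem.Str.startswith head "|-" then
      [] :: pvGroups rest
    else
      -- Python's gs[0] / gs[1:]: _groups never returns []
      let gs := pvGroups rest
      (head :: gs.headD []) :: gs.tail

def parse_wikitext_table_alt (table_text : String) : List (List String) :=
  let stripped := ((PySem.Str.split? table_text "\n").getD []).map PySem.Str.strip
  (pvGroups stripped).foldl
    (fun rows g =>
      let cells := (g.filter
        (fun ln => PySem.Str.startswith ln "|" && !PySem.Str.startswith ln "|}")).map pvCell
      if cells.isEmpty then rows else rows ++ [cells]) []

-- ===== PRECONDITION & SPEC =====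
def Spec_parse_wikitext_table (table_text : String) (out : List (List String)) : Prop := out = parse_wikitext_table_alt table_text
instance (table_text : String) (out : List (List String)) : Decidable (Spec_parse_wikitext_table table_text out) := by unfold Spec_parse_wikitext_table; infer_instance

-- ===== CLAIM =====
def Claim_equal_parse_wikitext_table : Prop := ∀ (table_text : String), Dom_parse_wikitext_table table_text → Spec_parse_wikitext_table table_text (parse_wikitext_table table_text)

-- ===== LEMMAS AND PROOFS =====

-- a line starting with '|' does not start with '!'
lemma pvBang (l : String) (h : PySem.Str.startswith l "|" = true) :
    PySem.Str.startswith l "!" = false := by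
  simp only [PySem.Str.startswith_eq] at *
  rw [PySem.Chars.startswith_iff] at h
  have h1 : ("|" : String).toList = ['|'] := by decide
  have h2 : ("!" : String).toList = ['!'] := by decide
  rw [h1] at h
  rw [h2, Bool.eq_false_iff]
  intro hc
  rw [PySem.Chars.startswith_iff] at hc
  rcases h with ⟨t, ht⟩
  rcases hc with ⟨u, hu⟩
  rw [← ht] at hu
  simp at hu

lemma pvGroups_ne_nil (ls : List String) : pvGroups ls ≠ [] := by
  cases ls with
  | nil => simp [pvGroups]
  | cons head rest => simp only [pvGroups]; split <;> simp

-- cells of a group; row list of a group list (proof-only helpers)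
def pvCells (g : List String) : List String :=
  (g.filter (fun ln => PySem.Str.startswith ln "|" && !PySem.Str.startswith ln "|}")).map pvCell

def pvRows : List (List String) → List (List String)
  | [] => []
  | g :: gs => (if (pvCells g).isEmpty then [] else [pvCells g]) ++ pvRows gs

lemma pvRows_foldl (gs : List (List String)) (init : List (List String)) :
    gs.foldl (fun rows g =>
      let cells := (g.filter
        (fun ln => PySem.Str.startswith ln "|" && !PySem.Str.startswith ln "|}")).map pvCell
      if cells.isEmpty then rows else rows ++ [cells]) init = init ++ pvRows gs := by
  induction gs generalizing init with
  | nil => simp [pvRows]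
  | cons g gs ih => simp only [List.foldl_cons, pvRows]; rw [ih]; simp only [pvCells]; split <;> simp_all [List.isEmpty_iff]

def pvStep (st : List (List String) × List String) (line : String) :
    List (List String) × List String :=
  if PySem.Str.startswith line "|-" then
    ((if st.2.isEmpty then st.1 else st.1 ++ [st.2]), [])
  else if PySem.Str.startswith line "|" && !PySem.Str.startswith line "|}"
          && !PySem.Str.startswith line "|-" then
    if !PySem.Str.startswith line "!" then (st.1, st.2 ++ [pvCell line]) else (st.1, st.2)
  else st

lemma pvMain (ls : List String) (rows : List (List String)) (cur : List String) :
    (let st := ls.foldl pvStep (rows, cur)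
     if st.2.isEmpty then st.1 else st.1 ++ [st.2])
    = rows ++ (if (cur ++ pvCells ((pvGroups ls).headD [])).isEmpty then []
               else [cur ++ pvCells ((pvGroups ls).headD [])]) ++ pvRows (pvGroups ls).tail := by
  induction ls generalizing rows cur with
  | nil =>
    simp only [List.foldl_nil, pvGroups, List.headD, List.tail, pvCells, pvRows]
    split <;> simp_all [List.isEmpty_iff]
  | cons l ls ih =>
    obtain ⟨g0, rest, hg⟩ := List.exists_cons_of_ne_nil (pvGroups_ne_nil ls)
    simp only [List.foldl_cons]
    by_cases hsep : PySem.Str.startswith l "|-" = true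
    · have hstep : pvStep (rows, cur) l
          = ((if cur.isEmpty then rows else rows ++ [cur]), []) := by
        simp only [pvStep]; rw [if_pos hsep]
      rw [hstep, ih]
      simp only [pvGroups, hsep, if_true, List.headD, List.tail, hg]
      simp only [pvRows, List.nil_append]
      split <;> split <;> simp_all [List.isEmpty_iff, pvCells]
    · have hsep' : PySem.Str.startswith l "|-" = false := Bool.eq_false_iff.mpr hsep
      simp only [pvGroups]
      rw [if_neg hsep]
      by_cases hkb : (PySem.Str.startswith l "|" && !PySem.Str.startswith l "|}") = true
      · have hpipe : PySem.Str.startswith l "|" = true := (Bool.and_eq_true_iff.mp hkb).1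
        have hbang := pvBang l hpipe
        have hstep : pvStep (rows, cur) l = (rows, cur ++ [pvCell l]) := by
          simp only [pvStep]
          rw [if_neg hsep, if_pos (by rw [hkb, hsep']; rfl),
            if_pos (by rw [hbang]; rfl)]
        rw [hstep, ih]
        simp only [hg, List.headD, List.tail]
        have hcells : pvCells (l :: g0) = pvCell l :: pvCells g0 := by
          have h1 : PySem.Chars.startswith l.toList ['|'] = true := by simpa using hpipe
          have h2 : PySem.Chars.startswith l.toList ['|', '}'] = false := by
            have := (Bool.and_eq_true_iff.mp hkb).2; simpa using this
          simp [pvCells, h1, h2]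
        rw [hcells]
        simp
      · have hkb' : (PySem.Str.startswith l "|" && !PySem.Str.startswith l "|}") = false :=
          Bool.eq_false_iff.mpr hkb
        have hstep : pvStep (rows, cur) l = (rows, cur) := by
          simp only [pvStep]
          rw [if_neg hsep,
            if_neg (by rw [hsep']; simp only [Bool.not_false, Bool.and_true]; exact hkb)]
        rw [hstep, ih]
        simp only [hg, List.headD, List.tail]
        have hcells : pvCells (l :: g0) = pvCells g0 := by
          have h2 : ¬(PySem.Chars.startswith l.toList ['|'] = true ∧
              PySem.Chars.startswith l.toList ['|', '}'] = false) := by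
            rintro ⟨ha, hb⟩
            have ha' : PySem.Str.startswith l "|" = true := by simpa using ha
            have hb' : PySem.Str.startswith l "|}" = false := by simpa using hb
            rw [ha', hb'] at hkb'
            simp at hkb'
          simp [pvCells, h2]
        rw [hcells]

theorem parse_wikitext_table_spec : Claim_equal_parse_wikitext_table := by
  intro table_text _
  unfold Spec_parse_wikitext_table parse_wikitext_table parse_wikitext_table_alt
  rw [pvRows_foldl]
  have hm := pvMain (((PySem.Str.split? table_text "\n").getD []).map PySem.Str.strip) [] []
  rw [List.foldl_map] at hm
  obtain ⟨g0, rest, hg⟩ := List.exists_cons_of_ne_nil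
    (pvGroups_ne_nil (((PySem.Str.split? table_text "\n").getD []).map PySem.Str.strip))
  rw [hg] at hm ⊢
  simp only [List.headD_cons, List.tail_cons, List.nil_append] at hm
  simp only [pvRows, List.nil_append]
  exact hm
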